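-- pv_equiv track=rewrite | github.com/ksj15242/Algorithm | 프로그래머스/1/64061. 크레인 인형뽑기 게임/크레인 인형뽑기 게임.py | getRemovedFigureCount
-- ===== SOURCE A (Python) =====
-- def getRemovedFigureCount(stack):
--     removedCount = 0
--
--     while len(stack)>=2:
--         if stack[-2]!=stack[-1]:
--             break
--
--         stack.pop()
--         stack.pop()
--         removedCount += 2
--
--     return removedCount
-- ===== SOURCE B (Python) =====
-- def getRemovedFigureCount(stack):
--     i = len(stack) - 1
--     removed = 0
--     while i >= 1 and stack[i] == stack[i - 1]:
--         i -= 2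
--         removed += 2
--     del stack[len(stack) - removed:]
--     return removed
-- ===== Notes on version B (the rewrite author's own statement) =====
-- stated objective: alternative
-- what changed: B replaces A's repeated pop-pop mutation loop with a pure index scan from the top counting matching adjacent pairs, followed by one bulk deletion of the counted suffix.
import Mathlib
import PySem

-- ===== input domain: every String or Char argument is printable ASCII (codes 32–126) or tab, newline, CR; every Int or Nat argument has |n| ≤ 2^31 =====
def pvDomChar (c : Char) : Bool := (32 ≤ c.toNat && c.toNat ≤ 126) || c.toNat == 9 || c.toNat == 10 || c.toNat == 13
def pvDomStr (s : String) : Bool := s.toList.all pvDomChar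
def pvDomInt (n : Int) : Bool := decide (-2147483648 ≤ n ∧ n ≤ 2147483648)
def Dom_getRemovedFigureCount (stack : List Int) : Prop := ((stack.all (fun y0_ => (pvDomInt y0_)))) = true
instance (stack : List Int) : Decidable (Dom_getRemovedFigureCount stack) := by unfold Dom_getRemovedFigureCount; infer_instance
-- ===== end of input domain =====

-- B differs from A by scanning indices from the top and deleting the counted suffix in one step;
-- the equivalence proved here is about the RETURN value (both Pythons leave the argument in the same final state).

-- ===== PORT A =====
-- A's while-loop: pop the top two while they are equal, counting.
def pvLoopA (stack : List Int) (removedCount : Int) : Int :=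
  if _h : 2 ≤ stack.length then
    if PySem.List.pyGet? stack (-2) ≠ PySem.List.pyGet? stack (-1) then removedCount
    else pvLoopA stack.dropLast.dropLast (removedCount + 2)
  else removedCount
termination_by stack.length
decreasing_by simp [List.length_dropLast]; omega

def getRemovedFigureCount (stack : List Int) : Int := pvLoopA stack 0

-- ===== PORT B =====
-- B's while-loop: pure index scan (no mutation), i steps down by 2 while stack[i] == stack[i-1].
def pvLoopB (stack : List Int) (i : Int) (removed : Int) : Int :=
  if _h : 1 ≤ i then
    if PySem.List.pyGet? stack i = PySem.List.pyGet? stack (i - 1) then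
      pvLoopB stack (i - 2) (removed + 2)
    else removed
  else removed
termination_by i.toNat
decreasing_by omega

def getRemovedFigureCount_alt (stack : List Int) : Int :=
  pvLoopB stack ((stack.length : Int) - 1) 0

-- ===== PRECONDITION & SPEC =====
def Spec_getRemovedFigureCount (stack : List Int) (out : Int) : Prop := out = getRemovedFigureCount_alt stack
instance (stack : List Int) (out : Int) : Decidable (Spec_getRemovedFigureCount stack out) := by unfold Spec_getRemovedFigureCount; infer_instance

-- ===== CLAIM (what is proved, stated in full; the proofs are below) =====
def Claim_equal_getRemovedFigureCount : Prop := ∀ (stack : List Int), Dom_getRemovedFigureCount stack → Spec_getRemovedFigureCount stack (getRemovedFigureCount stack)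

-- ===== LEMMAS AND PROOFS =====

-- pyGet? on a prefix agrees with pyGet? on the whole list for nonnegative indices below the cut.
lemma pvPyGet_take (s : List Int) (k : ℕ) (i : Int) (h0 : 0 ≤ i) (hk : i < (k : Int)) :
    PySem.List.pyGet? (s.take k) i = PySem.List.pyGet? s i := by
  rw [PySem.List.pyGet?_of_nonneg _ h0, PySem.List.pyGet?_of_nonneg _ h0]
  rw [List.getElem?_take]
  rw [if_pos (by omega)]

-- pvLoopB only looks below i, so it is unchanged by truncating above i.
lemma pvLoopB_take (s : List Int) (k : ℕ) (i r : Int) (hk : i < (k : Int)) :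
    pvLoopB (s.take k) i r = pvLoopB s i r := by
  by_cases h1 : 1 ≤ i
  · conv_lhs => rw [pvLoopB]
    conv_rhs => rw [pvLoopB]
    simp only [dif_pos h1]
    rw [pvPyGet_take s k i (by omega) hk, pvPyGet_take s k (i - 1) (by omega) (by omega)]
    split_ifs with _
    · exact pvLoopB_take s k (i - 2) (r + 2) (by omega)
    · rfl
  · conv_lhs => rw [pvLoopB]
    conv_rhs => rw [pvLoopB]
    simp [h1]
termination_by i.toNat
decreasing_by omega

lemma pvLoopA_eq_loopB (n : ℕ) : ∀ (s : List Int) (r : Int), s.length = n →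
    pvLoopA s r = pvLoopB s ((s.length : Int) - 1) r := by
  induction n using Nat.strong_induction_on with
  | _ n ih =>
    intro s r hn
    by_cases h2 : 2 ≤ s.length
    · rw [pvLoopA]
      simp only [dif_pos h2]
      have hg2 : PySem.List.pyGet? s (-2) = s[s.length - 2]? :=
        PySem.List.pyGet?_neg_ofNat s 2 (by omega) h2
      have hg1 : PySem.List.pyGet? s (-1) = s[s.length - 1]? :=
        PySem.List.pyGet?_neg_ofNat s 1 (by omega) (by omega)
      have hb1 : (1 : Int) ≤ (s.length : Int) - 1 := by omega
      have hB1 : PySem.List.pyGet? s ((s.length : Int) - 1) = s[s.length - 1]? := by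
        rw [PySem.List.pyGet?_of_nonneg _ (by omega : (0:Int) ≤ (s.length : Int) - 1)]
        congr 1; omega
      have hB2 : PySem.List.pyGet? s ((s.length : Int) - 1 - 1) = s[s.length - 2]? := by
        rw [PySem.List.pyGet?_of_nonneg _ (by omega : (0:Int) ≤ (s.length : Int) - 1 - 1)]
        congr 1; omega
      conv_rhs => rw [pvLoopB]
      simp only [dif_pos hb1, hB1, hB2, hg1, hg2]
      by_cases heq : s[s.length - 2]? = s[s.length - 1]?
      · rw [if_neg (by simp [heq]), if_pos heq.symm]
        have hdl : s.dropLast.dropLast = s.take (s.length - 2) := by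
          rw [List.dropLast_eq_take, List.dropLast_eq_take, List.take_take]
          simp [List.length_take]
          omega
        have hlen : s.dropLast.dropLast.length = s.length - 2 := by
          simp only [List.length_dropLast]
          omega
        have hih := ih (s.length - 2) (by omega) s.dropLast.dropLast (r + 2) hlen
        rw [hih, hlen, hdl]
        rw [pvLoopB_take s (s.length - 2) _ _ (by omega)]
        have : ((s.length - 2 : ℕ) : Int) - 1 = (s.length : Int) - 1 - 2 := by omega
        rw [this]
      · rw [if_pos heq, if_neg (fun h => heq h.symm)]
    · rw [pvLoopA]
      conv_rhs => rw [pvLoopB]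
      have h1 : ¬ (1 : Int) ≤ (s.length : Int) - 1 := by omega
      simp [h2, h1]

-- ===== VERDICT (by name: the statement is the Claim_ definition above) =====
theorem getRemovedFigureCount_spec : Claim_equal_getRemovedFigureCount := by
  intro stack _
  unfold Spec_getRemovedFigureCount getRemovedFigureCount getRemovedFigureCount_alt
  exact pvLoopA_eq_loopB stack.length stack 0 rfl
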